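-- pv_equiv track=rewrite | github.com/frbrigagao/DL4H-Reproduce-KeyClass | mimic_preprocessing/createAdmissionNoteTable.py | process_icd9
-- ===== SOURCE A (Python) =====
-- def process_icd9(icd9_code):
--     level2_list = []
--     top_list = []
--     if isinstance(icd9_code, str):
--         icd9_row = icd9_code.split('-')
--         for icd9 in icd9_row:
--             if not icd9:
--                 continue
--
--             if icd9.startswith('E'):
--                 icd_level2 = icd9[:4]
--                 icd9_top = 'cat:19'
--             elif icd9.startswith('V'):
--                 icd_level2 = icd9[:3]
--                 icd9_top = 'cat:20'
--             else:
--                 try: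
--                     icd9_num = int(float(icd9[:3]))
--                     icd_level2 = icd9[:3]
--
--                     if 1 <= icd9_num <= 139:     # Infectious and parasitic diseases
--                         icd9_top = 'cat:1'
--                     elif 140 <= icd9_num <= 239: # Neoplasms
--                         icd9_top = 'cat:2'
--                     elif 240 <= icd9_num <= 279: # Endocrine, nutritional and metabolic diseases, and immunity disorders
--                         icd9_top = 'cat:3'
--                     elif 280 <= icd9_num <= 289: # Diseases of blood and blood-forming organs
--                         icd9_top = 'cat:4'
--                     elif 290 <= icd9_num <= 319: # Mental disorders
--                         icd9_top = 'cat:5'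
--                     elif 320 <= icd9_num <= 359: # Diseases of the nervous system
--                         icd9_top = 'cat:6'
--                     elif 360 <= icd9_num <= 389: # Diseases of sense organs
--                         icd9_top = 'cat:7'
--                     elif 390 <= icd9_num <= 459: # Diseases of the circulatory system
--                         icd9_top = 'cat:8'
--                     elif 460 <= icd9_num <= 519: # Diseases of the respiratory system
--                         icd9_top = 'cat:9'
--                     elif 520 <= icd9_num <= 579: # Diseases of the digestive system
--                         icd9_top = 'cat:10'
--                     elif 580 <= icd9_num <= 629: # Diseases of the genitourinary system
--                         icd9_top = 'cat:11'
--                     elif 630 <= icd9_num <= 679: # Complications of pregnancy, childbirth, and the puerperium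
--                         icd9_top = 'cat:12'
--                     elif 680 <= icd9_num <= 709: # Diseases of the skin and subcutaneous tissue
--                         icd9_top = 'cat:13'
--                     elif 710 <= icd9_num <= 739: # Diseases of the musculoskeletal system and connective tissue
--                         icd9_top = 'cat:14'
--                     elif 740 <= icd9_num <= 759: # Congenital anomalies
--                         icd9_top = 'cat:15'
--                     elif 760 <= icd9_num <= 779: # Certain conditions originating in the perinatal period
--                         icd9_top = 'cat:16'
--                     elif 780 <= icd9_num <= 799: # Symptoms, signs, and ill-defined conditions
--                         icd9_top = 'cat:17'
--                     elif 800 <= icd9_num <= 999: # Injury and poisoning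
--                         icd9_top = 'cat:18'
--                     else:
--                         icd9_top = None
--                 except ValueError:
--                     icd9_top = None
--                     icd_level2 = None
--             top_list.append(icd9_top)
--             level2_list.append(icd_level2)
--
--     return (
--         '-'.join(sorted(list(set(filter(None, level2_list))))),
--         '-'.join(sorted(list(set(filter(None, top_list))))),
--     )  # Remove None values
-- ===== SOURCE B (Python) =====
-- # Re-implementation: per-token classification via a helper that binary-searches a
-- # sorted boundary table (instead of the 18-branch if/elif chain), and the result is
-- # built in staged passes (classify into pairs, then set comprehensions) instead of
-- # A's single loop appending to two None-padded lists filtered at the end.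
-- _BOUNDS = [1, 140, 240, 280, 290, 320, 360, 390, 460, 520, 580, 630, 680, 710, 740, 760, 780, 800, 1000]
--
--
-- def _cat_of(n):
--     # number of boundaries <= n, found by binary search (bisect_right by hand)
--     lo, hi = 0, len(_BOUNDS)
--     while lo < hi:
--         mid = (lo + hi) // 2
--         if _BOUNDS[mid] <= n:
--             lo = mid + 1
--         else:
--             hi = mid
--     if 1 <= lo <= 18:
--         return 'cat:%d' % lo
--     return None
--
--
-- def _classify(tok):
--     if tok.startswith('E'):
--         return (tok[:4], 'cat:19')
--     if tok.startswith('V'):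
--         return (tok[:3], 'cat:20')
--     try:
--         n = int(float(tok[:3]))
--     except ValueError:
--         return (None, None)
--     return (tok[:3], _cat_of(n))
--
--
-- def process_icd9(icd9_code):
--     pairs = []
--     if isinstance(icd9_code, str):
--         pairs = [_classify(t) for t in icd9_code.split('-') if t]
--     return ('-'.join(sorted({l for l, _ in pairs if l})),
--             '-'.join(sorted({t for _, t in pairs if t})))
-- ===== Notes on version B (the rewrite author's own statement) =====
-- stated objective: alternative
-- what changed: Replaces the 18-branch if/elif range chain by a hand-written binary search over a sorted boundary table (bisect_right), and restructures the function into staged passes: a classify helper mapped over the non-empty tokens producing (level2, top) pairs, then set comprehensions and sorted joins, instead of A's single loop appending to two None-padded lists filtered at the end.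
import Mathlib
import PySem

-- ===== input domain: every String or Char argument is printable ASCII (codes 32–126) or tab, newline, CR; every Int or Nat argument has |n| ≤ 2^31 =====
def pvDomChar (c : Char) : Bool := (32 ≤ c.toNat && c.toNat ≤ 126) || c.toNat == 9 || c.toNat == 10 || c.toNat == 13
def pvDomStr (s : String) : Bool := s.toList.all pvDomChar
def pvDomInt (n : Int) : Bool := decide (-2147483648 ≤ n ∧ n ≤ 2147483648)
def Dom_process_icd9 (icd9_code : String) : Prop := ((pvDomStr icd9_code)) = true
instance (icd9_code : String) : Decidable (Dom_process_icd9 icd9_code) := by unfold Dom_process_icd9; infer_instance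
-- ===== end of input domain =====

-- B replaces A's 18-branch if/elif range chain by a binary search over a sorted boundary
-- table, and restructures the function into staged passes (classify tokens into pairs, then
-- set comprehensions) instead of A's single append loop over None-padded lists (objective:
-- alternative).

-- ===== shared primitive =====
-- Hand port of Python's `int(float(s))` for strings of at most 3 printable-ASCII/tab/NL/CR
-- characters (both A and B only ever apply it to `tok[:3]`): `none` where that expression
-- raises. It is exact on that domain except that the case float('inf')/'INF'/… — where
-- Python raises OverflowError, an input excluded by Pre_process_icd9 below — also returns
-- `none`.
def pvIsWs (c : Char) : Bool := c = ' ' || c = '\t' || c = '\n' || c = '\r'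
def pvIsDig (c : Char) : Bool := '0' ≤ c && c ≤ '9'
def pvDigVal (c : Char) : Nat := c.toNat - 48
def pvDigitsVal (l : List Char) : Nat := l.foldl (fun a c => 10 * a + pvDigVal c) 0
def pvStripWs (cs : List Char) : List Char :=
  (((cs.dropWhile pvIsWs).reverse).dropWhile pvIsWs).reverse
-- split at the first 'e'/'E' (mantissa, optional exponent text)
def pvSplitE : List Char → List Char × Option (List Char)
  | [] => ([], none)
  | c :: r =>
    if c = 'e' || c = 'E' then ([], some r)
    else
      let p := pvSplitE r
      (c :: p.1, p.2)
-- split at the first '.' (integer part, optional fraction text)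
def pvSplitDot : List Char → List Char × Option (List Char)
  | [] => ([], none)
  | c :: r =>
    if c = '.' then ([], some r)
    else
      let p := pvSplitDot r
      (c :: p.1, p.2)
-- exponent text: optional sign then nonempty digits
def pvParseExp : List Char → Option Int
  | '+' :: r => if r ≠ [] ∧ r.all pvIsDig then some ((pvDigitsVal r : Nat) : Int) else none
  | '-' :: r => if r ≠ [] ∧ r.all pvIsDig then some (-((pvDigitsVal r : Nat) : Int)) else none
  | r => if r ≠ [] ∧ r.all pvIsDig then some ((pvDigitsVal r : Nat) : Int) else none

def pyIntFloat3? (cs0 : List Char) : Option Int :=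
  let cs := pvStripWs cs0
  if cs = [] then none
  else if cs.contains '_' then
    -- with ≤ 3 chars the only valid underscored literal is digit '_' digit
    match cs with
    | [a, b, c] => if pvIsDig a ∧ b = '_' ∧ pvIsDig c then some ((10 * pvDigVal a + pvDigVal c : Nat) : Int) else none
    | _ => none
  else
    let sb : Int × List Char :=
      match cs with
      | '+' :: r => (1, r)
      | '-' :: r => (-1, r)
      | r => (1, r)
    let sign := sb.1
    let body := sb.2
    let low := body.map PySem.Chars.lowerChar
    if low = ['n', 'a', 'n'] then none        -- int(nan) raises ValueError
    else if low = ['i', 'n', 'f'] then none   -- int(inf) raises OverflowError (outside Pre_)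
    else
      let me := pvSplitE body
      let ifp := pvSplitDot me.1
      let ip := ifp.1
      let fp := (ifp.2).getD []
      if ip.all pvIsDig ∧ fp.all pvIsDig ∧ (ip ≠ [] ∨ fp ≠ []) then
        match me.2 with
        | none => some (sign * (pvDigitsVal ip : Int))
        | some ecs =>
          match pvParseExp ecs with
          | none => none
          | some e =>
            let num := pvDigitsVal (ip ++ fp)
            let sc : Int := (fp.length : Int)
            let mag : Nat :=
              if sc ≤ e then num * 10 ^ (e - sc).toNat else num / 10 ^ (sc - e).toNat
            some (sign * (mag : Int))
      else none

-- ===== PORT A =====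
def pvCatOfNum (n : Int) : Option String :=
  if 1 ≤ n ∧ n ≤ 139 then some "cat:1"
  else if 140 ≤ n ∧ n ≤ 239 then some "cat:2"
  else if 240 ≤ n ∧ n ≤ 279 then some "cat:3"
  else if 280 ≤ n ∧ n ≤ 289 then some "cat:4"
  else if 290 ≤ n ∧ n ≤ 319 then some "cat:5"
  else if 320 ≤ n ∧ n ≤ 359 then some "cat:6"
  else if 360 ≤ n ∧ n ≤ 389 then some "cat:7"
  else if 390 ≤ n ∧ n ≤ 459 then some "cat:8"
  else if 460 ≤ n ∧ n ≤ 519 then some "cat:9"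
  else if 520 ≤ n ∧ n ≤ 579 then some "cat:10"
  else if 580 ≤ n ∧ n ≤ 629 then some "cat:11"
  else if 630 ≤ n ∧ n ≤ 679 then some "cat:12"
  else if 680 ≤ n ∧ n ≤ 709 then some "cat:13"
  else if 710 ≤ n ∧ n ≤ 739 then some "cat:14"
  else if 740 ≤ n ∧ n ≤ 759 then some "cat:15"
  else if 760 ≤ n ∧ n ≤ 779 then some "cat:16"
  else if 780 ≤ n ∧ n ≤ 799 then some "cat:17"
  else if 800 ≤ n ∧ n ≤ 999 then some "cat:18"
  else none

def pvStepA (st : List (Option String) × List (Option String)) (icd9 : String) :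
    List (Option String) × List (Option String) :=
  if icd9.toList = [] then st
  else
    let lt : Option String × Option String :=
      if PySem.Str.startswith icd9 "E" then
        (some (String.mk (icd9.toList.take 4)), some "cat:19")
      else if PySem.Str.startswith icd9 "V" then
        (some (String.mk (icd9.toList.take 3)), some "cat:20")
      else
        match pyIntFloat3? (icd9.toList.take 3) with
        | some n => (some (String.mk (icd9.toList.take 3)), pvCatOfNum n)
        | none => (none, none)   -- except ValueError: both None
    (st.1 ++ [lt.1], st.2 ++ [lt.2])

-- '-'.join(sorted(list(set(filter(None, l)))))
def pvFinishA (l : List (Option String)) : String :=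
  PySem.Str.join "-" (PySem.List.sorted (PySem.Set.ofList (l.filterMap id)) (fun x => x) false)

def process_icd9 (icd9_code : String) : String × String :=
  let st := (((PySem.Str.split? icd9_code "-").getD [])).foldl pvStepA ([], [])
  (pvFinishA st.1, pvFinishA st.2)

-- ===== PORT B =====
-- _BOUNDS
def pvBounds : List Int := [1,140,240,280,290,320,360,390,460,520,580,630,680,710,740,760,780,800,1000]

-- the while-loop of _cat_of: binary search (bisect_right by hand) over pvBounds
def pvBS (n : Int) (lo hi : Nat) : Nat :=
  if lo < hi then
    let mid := (lo + hi) / 2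
    if pvBounds.getD mid 0 ≤ n then pvBS n (mid + 1) hi else pvBS n lo mid
  else lo
termination_by hi - lo
decreasing_by all_goals omega

-- _cat_of
def pvCatOf (n : Int) : Option String :=
  let i := pvBS n 0 19
  if 1 ≤ i ∧ i ≤ 18 then some ("cat:" ++ PySem.Int.toStr (i : Int)) else none

-- _classify
def pvClassify (tok : String) : Option String × Option String :=
  if PySem.Str.startswith tok "E" then
    (some (String.mk (tok.toList.take 4)), some "cat:19")
  else if PySem.Str.startswith tok "V" then
    (some (String.mk (tok.toList.take 3)), some "cat:20")
  else
    match pyIntFloat3? (tok.toList.take 3) with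
    | none => (none, none)   -- except ValueError
    | some n => (some (String.mk (tok.toList.take 3)), pvCatOf n)

def process_icd9_alt (icd9_code : String) : String × String :=
  let pairs := (((PySem.Str.split? icd9_code "-").getD []).filter
      (fun t => !t.toList.isEmpty)).map pvClassify
  (PySem.Str.join "-" (PySem.List.sorted (PySem.Set.ofList (pairs.filterMap Prod.fst)) (fun x => x) false),
   PySem.Str.join "-" (PySem.List.sorted (PySem.Set.ofList (pairs.filterMap Prod.snd)) (fun x => x) false))

-- ===== PRECONDITION & SPEC =====
-- Pre_ excludes exactly the inputs where Python A raises an uncaught OverflowError: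
-- a dash-separated token whose first three characters spell "inf" in any case
-- (int(float('inf'))). A returns normally on every other input (B raises there too).
def Pre_process_icd9 (icd9_code : String) : Prop :=
  ∀ t ∈ ((PySem.Str.split? icd9_code "-").getD []),
    (t.toList.take 3).map PySem.Chars.lowerChar ≠ ['i', 'n', 'f']
instance (icd9_code : String) : Decidable (Pre_process_icd9 icd9_code) := by
  unfold Pre_process_icd9; infer_instance
def pvWitness_process_icd9 : String := "401-E950-V30"

def Spec_process_icd9 (icd9_code : String) (out : String × String) : Prop := out = process_icd9_alt icd9_code
instance (icd9_code : String) (out : String × String) : Decidable (Spec_process_icd9 icd9_code out) := by unfold Spec_process_icd9; infer_instance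

-- ===== CLAIM (what is proved, stated in full; the proofs are below) =====
def Claim_equal_process_icd9 : Prop := ∀ (icd9_code : String), Dom_process_icd9 icd9_code → Pre_process_icd9 icd9_code → Spec_process_icd9 icd9_code (process_icd9 icd9_code)

-- ===== LEMMAS AND PROOFS =====

-- A's if/elif chain and B's binary search over the boundary table agree for every n
lemma pv_cat_eq (n : Int) : pvCatOfNum n = pvCatOf n := by
  have h : n < 1 ∨ (1 ≤ n ∧ n < 140) ∨ (140 ≤ n ∧ n < 240) ∨ (240 ≤ n ∧ n < 280) ∨ (280 ≤ n ∧ n < 290) ∨ (290 ≤ n ∧ n < 320) ∨ (320 ≤ n ∧ n < 360) ∨ (360 ≤ n ∧ n < 390) ∨ (390 ≤ n ∧ n < 460) ∨ (460 ≤ n ∧ n < 520) ∨ (520 ≤ n ∧ n < 580) ∨ (580 ≤ n ∧ n < 630) ∨ (630 ≤ n ∧ n < 680) ∨ (680 ≤ n ∧ n < 710) ∨ (710 ≤ n ∧ n < 740) ∨ (740 ≤ n ∧ n < 760) ∨ (760 ≤ n ∧ n < 780) ∨ (780 ≤ n ∧ n < 800) ∨ (800 ≤ n ∧ n < 1000)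 ∨ 1000 ≤ n := by omega
  rcases h with h | h | h | h | h | h | h | h | h | h | h | h | h | h | h | h | h | h | h | h
  · have hb : pvBS n 0 19 = 0 := by
      rw [pvBS]; norm_num [pvBounds]
      rw [if_neg (by omega : ¬ ((520:Int) ≤ n))]
      rw [pvBS]; norm_num [pvBounds]
      rw [if_neg (by omega : ¬ ((290:Int) ≤ n))]
      rw [pvBS]; norm_num [pvBounds]
      rw [if_neg (by omega : ¬ ((240:Int) ≤ n))]
      rw [pvBS]; norm_num [pvBounds]
      rw [if_neg (by omega : ¬ ((140:Int) ≤ n))]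
      rw [pvBS]; norm_num [pvBounds]
      rw [if_neg (by omega : ¬ ((1:Int) ≤ n))]
      rw [pvBS]; norm_num
    unfold pvCatOfNum pvCatOf
    rw [hb]
    rw [if_neg (by omega : ¬ ((1:Int) ≤ n ∧ n ≤ 139))]
    rw [if_neg (by omega : ¬ ((140:Int) ≤ n ∧ n ≤ 239))]
    rw [if_neg (by omega : ¬ ((240:Int) ≤ n ∧ n ≤ 279))]
    rw [if_neg (by omega : ¬ ((280:Int) ≤ n ∧ n ≤ 289))]
    rw [if_neg (by omega : ¬ ((290:Int) ≤ n ∧ n ≤ 319))]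
    rw [if_neg (by omega : ¬ ((320:Int) ≤ n ∧ n ≤ 359))]
    rw [if_neg (by omega : ¬ ((360:Int) ≤ n ∧ n ≤ 389))]
    rw [if_neg (by omega : ¬ ((390:Int) ≤ n ∧ n ≤ 459))]
    rw [if_neg (by omega : ¬ ((460:Int) ≤ n ∧ n ≤ 519))]
    rw [if_neg (by omega : ¬ ((520:Int) ≤ n ∧ n ≤ 579))]
    rw [if_neg (by omega : ¬ ((580:Int) ≤ n ∧ n ≤ 629))]
    rw [if_neg (by omega : ¬ ((630:Int) ≤ n ∧ n ≤ 679))]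
    rw [if_neg (by omega : ¬ ((680:Int) ≤ n ∧ n ≤ 709))]
    rw [if_neg (by omega : ¬ ((710:Int) ≤ n ∧ n ≤ 739))]
    rw [if_neg (by omega : ¬ ((740:Int) ≤ n ∧ n ≤ 759))]
    rw [if_neg (by omega : ¬ ((760:Int) ≤ n ∧ n ≤ 779))]
    rw [if_neg (by omega : ¬ ((780:Int) ≤ n ∧ n ≤ 799))]
    rw [if_neg (by omega : ¬ ((800:Int) ≤ n ∧ n ≤ 999))]
    decide
  · have hb : pvBS n 0 19 = 1 := by
      rw [pvBS]; norm_num [pvBounds]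
      rw [if_neg (by omega : ¬ ((520:Int) ≤ n))]
      rw [pvBS]; norm_num [pvBounds]
      rw [if_neg (by omega : ¬ ((290:Int) ≤ n))]
      rw [pvBS]; norm_num [pvBounds]
      rw [if_neg (by omega : ¬ ((240:Int) ≤ n))]
      rw [pvBS]; norm_num [pvBounds]
      rw [if_neg (by omega : ¬ ((140:Int) ≤ n))]
      rw [pvBS]; norm_num [pvBounds]
      rw [if_pos (by omega : ((1:Int) ≤ n))]
      rw [pvBS]; norm_num
    unfold pvCatOfNum pvCatOf
    rw [hb]
    rw [if_pos (by omega : ((1:Int) ≤ n ∧ n ≤ 139))]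
    decide
  · have hb : pvBS n 0 19 = 2 := by
      rw [pvBS]; norm_num [pvBounds]
      rw [if_neg (by omega : ¬ ((520:Int) ≤ n))]
      rw [pvBS]; norm_num [pvBounds]
      rw [if_neg (by omega : ¬ ((290:Int) ≤ n))]
      rw [pvBS]; norm_num [pvBounds]
      rw [if_neg (by omega : ¬ ((240:Int) ≤ n))]
      rw [pvBS]; norm_num [pvBounds]
      rw [if_pos (by omega : ((140:Int) ≤ n))]
      rw [pvBS]; norm_num
    unfold pvCatOfNum pvCatOf
    rw [hb]
    rw [if_neg (by omega : ¬ ((1:Int) ≤ n ∧ n ≤ 139))]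
    rw [if_pos (by omega : ((140:Int) ≤ n ∧ n ≤ 239))]
    decide
  · have hb : pvBS n 0 19 = 3 := by
      rw [pvBS]; norm_num [pvBounds]
      rw [if_neg (by omega : ¬ ((520:Int) ≤ n))]
      rw [pvBS]; norm_num [pvBounds]
      rw [if_neg (by omega : ¬ ((290:Int) ≤ n))]
      rw [pvBS]; norm_num [pvBounds]
      rw [if_pos (by omega : ((240:Int) ≤ n))]
      rw [pvBS]; norm_num [pvBounds]
      rw [if_neg (by omega : ¬ ((280:Int) ≤ n))]
      rw [pvBS]; norm_num
    unfold pvCatOfNum pvCatOf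
    rw [hb]
    rw [if_neg (by omega : ¬ ((1:Int) ≤ n ∧ n ≤ 139))]
    rw [if_neg (by omega : ¬ ((140:Int) ≤ n ∧ n ≤ 239))]
    rw [if_pos (by omega : ((240:Int) ≤ n ∧ n ≤ 279))]
    decide
  · have hb : pvBS n 0 19 = 4 := by
      rw [pvBS]; norm_num [pvBounds]
      rw [if_neg (by omega : ¬ ((520:Int) ≤ n))]
      rw [pvBS]; norm_num [pvBounds]
      rw [if_neg (by omega : ¬ ((290:Int) ≤ n))]
      rw [pvBS]; norm_num [pvBounds]
      rw [if_pos (by omega : ((240:Int) ≤ n))]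
      rw [pvBS]; norm_num [pvBounds]
      rw [if_pos (by omega : ((280:Int) ≤ n))]
      rw [pvBS]; norm_num
    unfold pvCatOfNum pvCatOf
    rw [hb]
    rw [if_neg (by omega : ¬ ((1:Int) ≤ n ∧ n ≤ 139))]
    rw [if_neg (by omega : ¬ ((140:Int) ≤ n ∧ n ≤ 239))]
    rw [if_neg (by omega : ¬ ((240:Int) ≤ n ∧ n ≤ 279))]
    rw [if_pos (by omega : ((280:Int) ≤ n ∧ n ≤ 289))]
    decide
  · have hb : pvBS n 0 19 = 5 := by
      rw [pvBS]; norm_num [pvBounds]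
      rw [if_neg (by omega : ¬ ((520:Int) ≤ n))]
      rw [pvBS]; norm_num [pvBounds]
      rw [if_pos (by omega : ((290:Int) ≤ n))]
      rw [pvBS]; norm_num [pvBounds]
      rw [if_neg (by omega : ¬ ((390:Int) ≤ n))]
      rw [pvBS]; norm_num [pvBounds]
      rw [if_neg (by omega : ¬ ((360:Int) ≤ n))]
      rw [pvBS]; norm_num [pvBounds]
      rw [if_neg (by omega : ¬ ((320:Int) ≤ n))]
      rw [pvBS]; norm_num
    unfold pvCatOfNum pvCatOf
    rw [hb]
    rw [if_neg (by omega : ¬ ((1:Int) ≤ n ∧ n ≤ 139))]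
    rw [if_neg (by omega : ¬ ((140:Int) ≤ n ∧ n ≤ 239))]
    rw [if_neg (by omega : ¬ ((240:Int) ≤ n ∧ n ≤ 279))]
    rw [if_neg (by omega : ¬ ((280:Int) ≤ n ∧ n ≤ 289))]
    rw [if_pos (by omega : ((290:Int) ≤ n ∧ n ≤ 319))]
    decide
  · have hb : pvBS n 0 19 = 6 := by
      rw [pvBS]; norm_num [pvBounds]
      rw [if_neg (by omega : ¬ ((520:Int) ≤ n))]
      rw [pvBS]; norm_num [pvBounds]
      rw [if_pos (by omega : ((290:Int) ≤ n))]
      rw [pvBS]; norm_num [pvBounds]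
      rw [if_neg (by omega : ¬ ((390:Int) ≤ n))]
      rw [pvBS]; norm_num [pvBounds]
      rw [if_neg (by omega : ¬ ((360:Int) ≤ n))]
      rw [pvBS]; norm_num [pvBounds]
      rw [if_pos (by omega : ((320:Int) ≤ n))]
      rw [pvBS]; norm_num
    unfold pvCatOfNum pvCatOf
    rw [hb]
    rw [if_neg (by omega : ¬ ((1:Int) ≤ n ∧ n ≤ 139))]
    rw [if_neg (by omega : ¬ ((140:Int) ≤ n ∧ n ≤ 239))]
    rw [if_neg (by omega : ¬ ((240:Int) ≤ n ∧ n ≤ 279))]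
    rw [if_neg (by omega : ¬ ((280:Int) ≤ n ∧ n ≤ 289))]
    rw [if_neg (by omega : ¬ ((290:Int) ≤ n ∧ n ≤ 319))]
    rw [if_pos (by omega : ((320:Int) ≤ n ∧ n ≤ 359))]
    decide
  · have hb : pvBS n 0 19 = 7 := by
      rw [pvBS]; norm_num [pvBounds]
      rw [if_neg (by omega : ¬ ((520:Int) ≤ n))]
      rw [pvBS]; norm_num [pvBounds]
      rw [if_pos (by omega : ((290:Int) ≤ n))]
      rw [pvBS]; norm_num [pvBounds]
      rw [if_neg (by omega : ¬ ((390:Int) ≤ n))]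
      rw [pvBS]; norm_num [pvBounds]
      rw [if_pos (by omega : ((360:Int) ≤ n))]
      rw [pvBS]; norm_num
    unfold pvCatOfNum pvCatOf
    rw [hb]
    rw [if_neg (by omega : ¬ ((1:Int) ≤ n ∧ n ≤ 139))]
    rw [if_neg (by omega : ¬ ((140:Int) ≤ n ∧ n ≤ 239))]
    rw [if_neg (by omega : ¬ ((240:Int) ≤ n ∧ n ≤ 279))]
    rw [if_neg (by omega : ¬ ((280:Int) ≤ n ∧ n ≤ 289))]
    rw [if_neg (by omega : ¬ ((290:Int) ≤ n ∧ n ≤ 319))]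
    rw [if_neg (by omega : ¬ ((320:Int) ≤ n ∧ n ≤ 359))]
    rw [if_pos (by omega : ((360:Int) ≤ n ∧ n ≤ 389))]
    decide
  · have hb : pvBS n 0 19 = 8 := by
      rw [pvBS]; norm_num [pvBounds]
      rw [if_neg (by omega : ¬ ((520:Int) ≤ n))]
      rw [pvBS]; norm_num [pvBounds]
      rw [if_pos (by omega : ((290:Int) ≤ n))]
      rw [pvBS]; norm_num [pvBounds]
      rw [if_pos (by omega : ((390:Int) ≤ n))]
      rw [pvBS]; norm_num [pvBounds]
      rw [if_neg (by omega : ¬ ((460:Int) ≤ n))]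
      rw [pvBS]; norm_num
    unfold pvCatOfNum pvCatOf
    rw [hb]
    rw [if_neg (by omega : ¬ ((1:Int) ≤ n ∧ n ≤ 139))]
    rw [if_neg (by omega : ¬ ((140:Int) ≤ n ∧ n ≤ 239))]
    rw [if_neg (by omega : ¬ ((240:Int) ≤ n ∧ n ≤ 279))]
    rw [if_neg (by omega : ¬ ((280:Int) ≤ n ∧ n ≤ 289))]
    rw [if_neg (by omega : ¬ ((290:Int) ≤ n ∧ n ≤ 319))]
    rw [if_neg (by omega : ¬ ((320:Int) ≤ n ∧ n ≤ 359))]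
    rw [if_neg (by omega : ¬ ((360:Int) ≤ n ∧ n ≤ 389))]
    rw [if_pos (by omega : ((390:Int) ≤ n ∧ n ≤ 459))]
    decide
  · have hb : pvBS n 0 19 = 9 := by
      rw [pvBS]; norm_num [pvBounds]
      rw [if_neg (by omega : ¬ ((520:Int) ≤ n))]
      rw [pvBS]; norm_num [pvBounds]
      rw [if_pos (by omega : ((290:Int) ≤ n))]
      rw [pvBS]; norm_num [pvBounds]
      rw [if_pos (by omega : ((390:Int) ≤ n))]
      rw [pvBS]; norm_num [pvBounds]
      rw [if_pos (by omega : ((460:Int) ≤ n))]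
      rw [pvBS]; norm_num
    unfold pvCatOfNum pvCatOf
    rw [hb]
    rw [if_neg (by omega : ¬ ((1:Int) ≤ n ∧ n ≤ 139))]
    rw [if_neg (by omega : ¬ ((140:Int) ≤ n ∧ n ≤ 239))]
    rw [if_neg (by omega : ¬ ((240:Int) ≤ n ∧ n ≤ 279))]
    rw [if_neg (by omega : ¬ ((280:Int) ≤ n ∧ n ≤ 289))]
    rw [if_neg (by omega : ¬ ((290:Int) ≤ n ∧ n ≤ 319))]
    rw [if_neg (by omega : ¬ ((320:Int) ≤ n ∧ n ≤ 359))]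
    rw [if_neg (by omega : ¬ ((360:Int) ≤ n ∧ n ≤ 389))]
    rw [if_neg (by omega : ¬ ((390:Int) ≤ n ∧ n ≤ 459))]
    rw [if_pos (by omega : ((460:Int) ≤ n ∧ n ≤ 519))]
    decide
  · have hb : pvBS n 0 19 = 10 := by
      rw [pvBS]; norm_num [pvBounds]
      rw [if_pos (by omega : ((520:Int) ≤ n))]
      rw [pvBS]; norm_num [pvBounds]
      rw [if_neg (by omega : ¬ ((740:Int) ≤ n))]
      rw [pvBS]; norm_num [pvBounds]
      rw [if_neg (by omega : ¬ ((680:Int) ≤ n))]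
      rw [pvBS]; norm_num [pvBounds]
      rw [if_neg (by omega : ¬ ((630:Int) ≤ n))]
      rw [pvBS]; norm_num [pvBounds]
      rw [if_neg (by omega : ¬ ((580:Int) ≤ n))]
      rw [pvBS]; norm_num
    unfold pvCatOfNum pvCatOf
    rw [hb]
    rw [if_neg (by omega : ¬ ((1:Int) ≤ n ∧ n ≤ 139))]
    rw [if_neg (by omega : ¬ ((140:Int) ≤ n ∧ n ≤ 239))]
    rw [if_neg (by omega : ¬ ((240:Int) ≤ n ∧ n ≤ 279))]
    rw [if_neg (by omega : ¬ ((280:Int) ≤ n ∧ n ≤ 289))]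
    rw [if_neg (by omega : ¬ ((290:Int) ≤ n ∧ n ≤ 319))]
    rw [if_neg (by omega : ¬ ((320:Int) ≤ n ∧ n ≤ 359))]
    rw [if_neg (by omega : ¬ ((360:Int) ≤ n ∧ n ≤ 389))]
    rw [if_neg (by omega : ¬ ((390:Int) ≤ n ∧ n ≤ 459))]
    rw [if_neg (by omega : ¬ ((460:Int) ≤ n ∧ n ≤ 519))]
    rw [if_pos (by omega : ((520:Int) ≤ n ∧ n ≤ 579))]
    decide
  · have hb : pvBS n 0 19 = 11 := by
      rw [pvBS]; norm_num [pvBounds]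
      rw [if_pos (by omega : ((520:Int) ≤ n))]
      rw [pvBS]; norm_num [pvBounds]
      rw [if_neg (by omega : ¬ ((740:Int) ≤ n))]
      rw [pvBS]; norm_num [pvBounds]
      rw [if_neg (by omega : ¬ ((680:Int) ≤ n))]
      rw [pvBS]; norm_num [pvBounds]
      rw [if_neg (by omega : ¬ ((630:Int) ≤ n))]
      rw [pvBS]; norm_num [pvBounds]
      rw [if_pos (by omega : ((580:Int) ≤ n))]
      rw [pvBS]; norm_num
    unfold pvCatOfNum pvCatOf
    rw [hb]
    rw [if_neg (by omega : ¬ ((1:Int) ≤ n ∧ n ≤ 139))]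
    rw [if_neg (by omega : ¬ ((140:Int) ≤ n ∧ n ≤ 239))]
    rw [if_neg (by omega : ¬ ((240:Int) ≤ n ∧ n ≤ 279))]
    rw [if_neg (by omega : ¬ ((280:Int) ≤ n ∧ n ≤ 289))]
    rw [if_neg (by omega : ¬ ((290:Int) ≤ n ∧ n ≤ 319))]
    rw [if_neg (by omega : ¬ ((320:Int) ≤ n ∧ n ≤ 359))]
    rw [if_neg (by omega : ¬ ((360:Int) ≤ n ∧ n ≤ 389))]
    rw [if_neg (by omega : ¬ ((390:Int) ≤ n ∧ n ≤ 459))]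
    rw [if_neg (by omega : ¬ ((460:Int) ≤ n ∧ n ≤ 519))]
    rw [if_neg (by omega : ¬ ((520:Int) ≤ n ∧ n ≤ 579))]
    rw [if_pos (by omega : ((580:Int) ≤ n ∧ n ≤ 629))]
    decide
  · have hb : pvBS n 0 19 = 12 := by
      rw [pvBS]; norm_num [pvBounds]
      rw [if_pos (by omega : ((520:Int) ≤ n))]
      rw [pvBS]; norm_num [pvBounds]
      rw [if_neg (by omega : ¬ ((740:Int) ≤ n))]
      rw [pvBS]; norm_num [pvBounds]
      rw [if_neg (by omega : ¬ ((680:Int) ≤ n))]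
      rw [pvBS]; norm_num [pvBounds]
      rw [if_pos (by omega : ((630:Int) ≤ n))]
      rw [pvBS]; norm_num
    unfold pvCatOfNum pvCatOf
    rw [hb]
    rw [if_neg (by omega : ¬ ((1:Int) ≤ n ∧ n ≤ 139))]
    rw [if_neg (by omega : ¬ ((140:Int) ≤ n ∧ n ≤ 239))]
    rw [if_neg (by omega : ¬ ((240:Int) ≤ n ∧ n ≤ 279))]
    rw [if_neg (by omega : ¬ ((280:Int) ≤ n ∧ n ≤ 289))]
    rw [if_neg (by omega : ¬ ((290:Int) ≤ n ∧ n ≤ 319))]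
    rw [if_neg (by omega : ¬ ((320:Int) ≤ n ∧ n ≤ 359))]
    rw [if_neg (by omega : ¬ ((360:Int) ≤ n ∧ n ≤ 389))]
    rw [if_neg (by omega : ¬ ((390:Int) ≤ n ∧ n ≤ 459))]
    rw [if_neg (by omega : ¬ ((460:Int) ≤ n ∧ n ≤ 519))]
    rw [if_neg (by omega : ¬ ((520:Int) ≤ n ∧ n ≤ 579))]
    rw [if_neg (by omega : ¬ ((580:Int) ≤ n ∧ n ≤ 629))]
    rw [if_pos (by omega : ((630:Int) ≤ n ∧ n ≤ 679))]
    decide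
  · have hb : pvBS n 0 19 = 13 := by
      rw [pvBS]; norm_num [pvBounds]
      rw [if_pos (by omega : ((520:Int) ≤ n))]
      rw [pvBS]; norm_num [pvBounds]
      rw [if_neg (by omega : ¬ ((740:Int) ≤ n))]
      rw [pvBS]; norm_num [pvBounds]
      rw [if_pos (by omega : ((680:Int) ≤ n))]
      rw [pvBS]; norm_num [pvBounds]
      rw [if_neg (by omega : ¬ ((710:Int) ≤ n))]
      rw [pvBS]; norm_num
    unfold pvCatOfNum pvCatOf
    rw [hb]
    rw [if_neg (by omega : ¬ ((1:Int) ≤ n ∧ n ≤ 139))]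
    rw [if_neg (by omega : ¬ ((140:Int) ≤ n ∧ n ≤ 239))]
    rw [if_neg (by omega : ¬ ((240:Int) ≤ n ∧ n ≤ 279))]
    rw [if_neg (by omega : ¬ ((280:Int) ≤ n ∧ n ≤ 289))]
    rw [if_neg (by omega : ¬ ((290:Int) ≤ n ∧ n ≤ 319))]
    rw [if_neg (by omega : ¬ ((320:Int) ≤ n ∧ n ≤ 359))]
    rw [if_neg (by omega : ¬ ((360:Int) ≤ n ∧ n ≤ 389))]
    rw [if_neg (by omega : ¬ ((390:Int) ≤ n ∧ n ≤ 459))]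
    rw [if_neg (by omega : ¬ ((460:Int) ≤ n ∧ n ≤ 519))]
    rw [if_neg (by omega : ¬ ((520:Int) ≤ n ∧ n ≤ 579))]
    rw [if_neg (by omega : ¬ ((580:Int) ≤ n ∧ n ≤ 629))]
    rw [if_neg (by omega : ¬ ((630:Int) ≤ n ∧ n ≤ 679))]
    rw [if_pos (by omega : ((680:Int) ≤ n ∧ n ≤ 709))]
    decide
  · have hb : pvBS n 0 19 = 14 := by
      rw [pvBS]; norm_num [pvBounds]
      rw [if_pos (by omega : ((520:Int) ≤ n))]
      rw [pvBS]; norm_num [pvBounds]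
      rw [if_neg (by omega : ¬ ((740:Int) ≤ n))]
      rw [pvBS]; norm_num [pvBounds]
      rw [if_pos (by omega : ((680:Int) ≤ n))]
      rw [pvBS]; norm_num [pvBounds]
      rw [if_pos (by omega : ((710:Int) ≤ n))]
      rw [pvBS]; norm_num
    unfold pvCatOfNum pvCatOf
    rw [hb]
    rw [if_neg (by omega : ¬ ((1:Int) ≤ n ∧ n ≤ 139))]
    rw [if_neg (by omega : ¬ ((140:Int) ≤ n ∧ n ≤ 239))]
    rw [if_neg (by omega : ¬ ((240:Int) ≤ n ∧ n ≤ 279))]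
    rw [if_neg (by omega : ¬ ((280:Int) ≤ n ∧ n ≤ 289))]
    rw [if_neg (by omega : ¬ ((290:Int) ≤ n ∧ n ≤ 319))]
    rw [if_neg (by omega : ¬ ((320:Int) ≤ n ∧ n ≤ 359))]
    rw [if_neg (by omega : ¬ ((360:Int) ≤ n ∧ n ≤ 389))]
    rw [if_neg (by omega : ¬ ((390:Int) ≤ n ∧ n ≤ 459))]
    rw [if_neg (by omega : ¬ ((460:Int) ≤ n ∧ n ≤ 519))]
    rw [if_neg (by omega : ¬ ((520:Int) ≤ n ∧ n ≤ 579))]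
    rw [if_neg (by omega : ¬ ((580:Int) ≤ n ∧ n ≤ 629))]
    rw [if_neg (by omega : ¬ ((630:Int) ≤ n ∧ n ≤ 679))]
    rw [if_neg (by omega : ¬ ((680:Int) ≤ n ∧ n ≤ 709))]
    rw [if_pos (by omega : ((710:Int) ≤ n ∧ n ≤ 739))]
    decide
  · have hb : pvBS n 0 19 = 15 := by
      rw [pvBS]; norm_num [pvBounds]
      rw [if_pos (by omega : ((520:Int) ≤ n))]
      rw [pvBS]; norm_num [pvBounds]
      rw [if_pos (by omega : ((740:Int) ≤ n))]
      rw [pvBS]; norm_num [pvBounds]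
      rw [if_neg (by omega : ¬ ((800:Int) ≤ n))]
      rw [pvBS]; norm_num [pvBounds]
      rw [if_neg (by omega : ¬ ((780:Int) ≤ n))]
      rw [pvBS]; norm_num [pvBounds]
      rw [if_neg (by omega : ¬ ((760:Int) ≤ n))]
      rw [pvBS]; norm_num
    unfold pvCatOfNum pvCatOf
    rw [hb]
    rw [if_neg (by omega : ¬ ((1:Int) ≤ n ∧ n ≤ 139))]
    rw [if_neg (by omega : ¬ ((140:Int) ≤ n ∧ n ≤ 239))]
    rw [if_neg (by omega : ¬ ((240:Int) ≤ n ∧ n ≤ 279))]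
    rw [if_neg (by omega : ¬ ((280:Int) ≤ n ∧ n ≤ 289))]
    rw [if_neg (by omega : ¬ ((290:Int) ≤ n ∧ n ≤ 319))]
    rw [if_neg (by omega : ¬ ((320:Int) ≤ n ∧ n ≤ 359))]
    rw [if_neg (by omega : ¬ ((360:Int) ≤ n ∧ n ≤ 389))]
    rw [if_neg (by omega : ¬ ((390:Int) ≤ n ∧ n ≤ 459))]
    rw [if_neg (by omega : ¬ ((460:Int) ≤ n ∧ n ≤ 519))]
    rw [if_neg (by omega : ¬ ((520:Int) ≤ n ∧ n ≤ 579))]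
    rw [if_neg (by omega : ¬ ((580:Int) ≤ n ∧ n ≤ 629))]
    rw [if_neg (by omega : ¬ ((630:Int) ≤ n ∧ n ≤ 679))]
    rw [if_neg (by omega : ¬ ((680:Int) ≤ n ∧ n ≤ 709))]
    rw [if_neg (by omega : ¬ ((710:Int) ≤ n ∧ n ≤ 739))]
    rw [if_pos (by omega : ((740:Int) ≤ n ∧ n ≤ 759))]
    decide
  · have hb : pvBS n 0 19 = 16 := by
      rw [pvBS]; norm_num [pvBounds]
      rw [if_pos (by omega : ((520:Int) ≤ n))]
      rw [pvBS]; norm_num [pvBounds]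
      rw [if_pos (by omega : ((740:Int) ≤ n))]
      rw [pvBS]; norm_num [pvBounds]
      rw [if_neg (by omega : ¬ ((800:Int) ≤ n))]
      rw [pvBS]; norm_num [pvBounds]
      rw [if_neg (by omega : ¬ ((780:Int) ≤ n))]
      rw [pvBS]; norm_num [pvBounds]
      rw [if_pos (by omega : ((760:Int) ≤ n))]
      rw [pvBS]; norm_num
    unfold pvCatOfNum pvCatOf
    rw [hb]
    rw [if_neg (by omega : ¬ ((1:Int) ≤ n ∧ n ≤ 139))]
    rw [if_neg (by omega : ¬ ((140:Int) ≤ n ∧ n ≤ 239))]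
    rw [if_neg (by omega : ¬ ((240:Int) ≤ n ∧ n ≤ 279))]
    rw [if_neg (by omega : ¬ ((280:Int) ≤ n ∧ n ≤ 289))]
    rw [if_neg (by omega : ¬ ((290:Int) ≤ n ∧ n ≤ 319))]
    rw [if_neg (by omega : ¬ ((320:Int) ≤ n ∧ n ≤ 359))]
    rw [if_neg (by omega : ¬ ((360:Int) ≤ n ∧ n ≤ 389))]
    rw [if_neg (by omega : ¬ ((390:Int) ≤ n ∧ n ≤ 459))]
    rw [if_neg (by omega : ¬ ((460:Int) ≤ n ∧ n ≤ 519))]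
    rw [if_neg (by omega : ¬ ((520:Int) ≤ n ∧ n ≤ 579))]
    rw [if_neg (by omega : ¬ ((580:Int) ≤ n ∧ n ≤ 629))]
    rw [if_neg (by omega : ¬ ((630:Int) ≤ n ∧ n ≤ 679))]
    rw [if_neg (by omega : ¬ ((680:Int) ≤ n ∧ n ≤ 709))]
    rw [if_neg (by omega : ¬ ((710:Int) ≤ n ∧ n ≤ 739))]
    rw [if_neg (by omega : ¬ ((740:Int) ≤ n ∧ n ≤ 759))]
    rw [if_pos (by omega : ((760:Int) ≤ n ∧ n ≤ 779))]
    decide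
  · have hb : pvBS n 0 19 = 17 := by
      rw [pvBS]; norm_num [pvBounds]
      rw [if_pos (by omega : ((520:Int) ≤ n))]
      rw [pvBS]; norm_num [pvBounds]
      rw [if_pos (by omega : ((740:Int) ≤ n))]
      rw [pvBS]; norm_num [pvBounds]
      rw [if_neg (by omega : ¬ ((800:Int) ≤ n))]
      rw [pvBS]; norm_num [pvBounds]
      rw [if_pos (by omega : ((780:Int) ≤ n))]
      rw [pvBS]; norm_num
    unfold pvCatOfNum pvCatOf
    rw [hb]
    rw [if_neg (by omega : ¬ ((1:Int) ≤ n ∧ n ≤ 139))]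
    rw [if_neg (by omega : ¬ ((140:Int) ≤ n ∧ n ≤ 239))]
    rw [if_neg (by omega : ¬ ((240:Int) ≤ n ∧ n ≤ 279))]
    rw [if_neg (by omega : ¬ ((280:Int) ≤ n ∧ n ≤ 289))]
    rw [if_neg (by omega : ¬ ((290:Int) ≤ n ∧ n ≤ 319))]
    rw [if_neg (by omega : ¬ ((320:Int) ≤ n ∧ n ≤ 359))]
    rw [if_neg (by omega : ¬ ((360:Int) ≤ n ∧ n ≤ 389))]
    rw [if_neg (by omega : ¬ ((390:Int) ≤ n ∧ n ≤ 459))]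
    rw [if_neg (by omega : ¬ ((460:Int) ≤ n ∧ n ≤ 519))]
    rw [if_neg (by omega : ¬ ((520:Int) ≤ n ∧ n ≤ 579))]
    rw [if_neg (by omega : ¬ ((580:Int) ≤ n ∧ n ≤ 629))]
    rw [if_neg (by omega : ¬ ((630:Int) ≤ n ∧ n ≤ 679))]
    rw [if_neg (by omega : ¬ ((680:Int) ≤ n ∧ n ≤ 709))]
    rw [if_neg (by omega : ¬ ((710:Int) ≤ n ∧ n ≤ 739))]
    rw [if_neg (by omega : ¬ ((740:Int) ≤ n ∧ n ≤ 759))]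
    rw [if_neg (by omega : ¬ ((760:Int) ≤ n ∧ n ≤ 779))]
    rw [if_pos (by omega : ((780:Int) ≤ n ∧ n ≤ 799))]
    decide
  · have hb : pvBS n 0 19 = 18 := by
      rw [pvBS]; norm_num [pvBounds]
      rw [if_pos (by omega : ((520:Int) ≤ n))]
      rw [pvBS]; norm_num [pvBounds]
      rw [if_pos (by omega : ((740:Int) ≤ n))]
      rw [pvBS]; norm_num [pvBounds]
      rw [if_pos (by omega : ((800:Int) ≤ n))]
      rw [pvBS]; norm_num [pvBounds]
      rw [if_neg (by omega : ¬ ((1000:Int) ≤ n))]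
      rw [pvBS]; norm_num
    unfold pvCatOfNum pvCatOf
    rw [hb]
    rw [if_neg (by omega : ¬ ((1:Int) ≤ n ∧ n ≤ 139))]
    rw [if_neg (by omega : ¬ ((140:Int) ≤ n ∧ n ≤ 239))]
    rw [if_neg (by omega : ¬ ((240:Int) ≤ n ∧ n ≤ 279))]
    rw [if_neg (by omega : ¬ ((280:Int) ≤ n ∧ n ≤ 289))]
    rw [if_neg (by omega : ¬ ((290:Int) ≤ n ∧ n ≤ 319))]
    rw [if_neg (by omega : ¬ ((320:Int) ≤ n ∧ n ≤ 359))]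
    rw [if_neg (by omega : ¬ ((360:Int) ≤ n ∧ n ≤ 389))]
    rw [if_neg (by omega : ¬ ((390:Int) ≤ n ∧ n ≤ 459))]
    rw [if_neg (by omega : ¬ ((460:Int) ≤ n ∧ n ≤ 519))]
    rw [if_neg (by omega : ¬ ((520:Int) ≤ n ∧ n ≤ 579))]
    rw [if_neg (by omega : ¬ ((580:Int) ≤ n ∧ n ≤ 629))]
    rw [if_neg (by omega : ¬ ((630:Int) ≤ n ∧ n ≤ 679))]
    rw [if_neg (by omega : ¬ ((680:Int) ≤ n ∧ n ≤ 709))]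
    rw [if_neg (by omega : ¬ ((710:Int) ≤ n ∧ n ≤ 739))]
    rw [if_neg (by omega : ¬ ((740:Int) ≤ n ∧ n ≤ 759))]
    rw [if_neg (by omega : ¬ ((760:Int) ≤ n ∧ n ≤ 779))]
    rw [if_neg (by omega : ¬ ((780:Int) ≤ n ∧ n ≤ 799))]
    rw [if_pos (by omega : ((800:Int) ≤ n ∧ n ≤ 999))]
    decide
  · have hb : pvBS n 0 19 = 19 := by
      rw [pvBS]; norm_num [pvBounds]
      rw [if_pos (by omega : ((520:Int) ≤ n))]
      rw [pvBS]; norm_num [pvBounds]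
      rw [if_pos (by omega : ((740:Int) ≤ n))]
      rw [pvBS]; norm_num [pvBounds]
      rw [if_pos (by omega : ((800:Int) ≤ n))]
      rw [pvBS]; norm_num [pvBounds]
      rw [if_pos (by omega : ((1000:Int) ≤ n))]
      rw [pvBS]; norm_num
    unfold pvCatOfNum pvCatOf
    rw [hb]
    rw [if_neg (by omega : ¬ ((1:Int) ≤ n ∧ n ≤ 139))]
    rw [if_neg (by omega : ¬ ((140:Int) ≤ n ∧ n ≤ 239))]
    rw [if_neg (by omega : ¬ ((240:Int) ≤ n ∧ n ≤ 279))]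
    rw [if_neg (by omega : ¬ ((280:Int) ≤ n ∧ n ≤ 289))]
    rw [if_neg (by omega : ¬ ((290:Int) ≤ n ∧ n ≤ 319))]
    rw [if_neg (by omega : ¬ ((320:Int) ≤ n ∧ n ≤ 359))]
    rw [if_neg (by omega : ¬ ((360:Int) ≤ n ∧ n ≤ 389))]
    rw [if_neg (by omega : ¬ ((390:Int) ≤ n ∧ n ≤ 459))]
    rw [if_neg (by omega : ¬ ((460:Int) ≤ n ∧ n ≤ 519))]
    rw [if_neg (by omega : ¬ ((520:Int) ≤ n ∧ n ≤ 579))]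
    rw [if_neg (by omega : ¬ ((580:Int) ≤ n ∧ n ≤ 629))]
    rw [if_neg (by omega : ¬ ((630:Int) ≤ n ∧ n ≤ 679))]
    rw [if_neg (by omega : ¬ ((680:Int) ≤ n ∧ n ≤ 709))]
    rw [if_neg (by omega : ¬ ((710:Int) ≤ n ∧ n ≤ 739))]
    rw [if_neg (by omega : ¬ ((740:Int) ≤ n ∧ n ≤ 759))]
    rw [if_neg (by omega : ¬ ((760:Int) ≤ n ∧ n ≤ 779))]
    rw [if_neg (by omega : ¬ ((780:Int) ≤ n ∧ n ≤ 799))]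
    rw [if_neg (by omega : ¬ ((800:Int) ≤ n ∧ n ≤ 999))]
    decide

-- one non-empty token: A's loop body appends exactly B's classification pair
lemma pv_step_classify (st : List (Option String) × List (Option String)) (t : String)
    (h : t.toList ≠ []) :
    pvStepA st t = (st.1 ++ [(pvClassify t).1], st.2 ++ [(pvClassify t).2]) := by
  unfold pvStepA pvClassify
  rw [if_neg h]
  by_cases hE : PySem.Chars.startswith t.toList ['E'] = true
  · simp [PySem.Str.startswith, hE]
  · by_cases hV : PySem.Chars.startswith t.toList ['V'] = true
    · simp [PySem.Str.startswith, hE, hV]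
    · cases hp : pyIntFloat3? (t.toList.take 3) with
      | none => simp [PySem.Str.startswith, hE, hV, hp]
      | some n => simp [PySem.Str.startswith, hE, hV, hp, pv_cat_eq n]

-- A's whole fold builds exactly B's pair lists (appended to the accumulators)
lemma pv_foldA (ts : List String) (l1 l2 : List (Option String)) :
    ts.foldl pvStepA (l1, l2) =
      (l1 ++ ((ts.filter (fun t => !t.toList.isEmpty)).map pvClassify).map Prod.fst,
       l2 ++ ((ts.filter (fun t => !t.toList.isEmpty)).map pvClassify).map Prod.snd) := by
  induction ts generalizing l1 l2 with
  | nil => simp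
  | cons t ts ih =>
    simp only [List.foldl_cons, List.filter_cons]
    by_cases h0 : t.toList = []
    · simp only [pvStepA, h0, if_pos rfl, List.isEmpty_iff, h0, Bool.not_true]
      simp [h0, ih]
    · rw [pv_step_classify (l1, l2) t h0]
      have hne : (t.toList.isEmpty : Bool) = false := by simp [List.isEmpty_iff, h0]
      simp [hne, ih, List.append_assoc]

-- ===== VERDICT (by name: the statement is the Claim_ definition above) =====
theorem process_icd9_spec : Claim_equal_process_icd9 := by
  intro s _ _
  unfold Spec_process_icd9 process_icd9 process_icd9_alt pvFinishA
  rw [pv_foldA]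
  simp [List.filterMap_map, Function.comp_def]
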